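-- pv_equiv track=rewrite | github.com/posl/comment_recommendation | script/mod_gen/3_time/zh/136_B/4.py | solve
-- ===== SOURCE A (Python) =====
-- def solve(n):
--     count = 0
--     for i in range(1, n+1):
--         if i < 10:
--             count += 1
--         else:
--             if i % 2 == 1:
--                 count += 1
--     return count
-- ===== SOURCE B (Python) =====
-- def solve(n):
--     # closed form: all of 1..min(n,9) count, plus the odd numbers in 10..n
--     if n < 1:
--         return 0
--     if n < 10:
--         return n
--     return 4 + (n + 1) // 2
-- ===== Notes on version B (the rewrite author's own statement) =====
-- stated objective: faster
-- what changed: Replaced the O(n) counting loop by a closed-form arithmetic formula (n for n<10, else 4 + (n+1)//2).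
import Mathlib
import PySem

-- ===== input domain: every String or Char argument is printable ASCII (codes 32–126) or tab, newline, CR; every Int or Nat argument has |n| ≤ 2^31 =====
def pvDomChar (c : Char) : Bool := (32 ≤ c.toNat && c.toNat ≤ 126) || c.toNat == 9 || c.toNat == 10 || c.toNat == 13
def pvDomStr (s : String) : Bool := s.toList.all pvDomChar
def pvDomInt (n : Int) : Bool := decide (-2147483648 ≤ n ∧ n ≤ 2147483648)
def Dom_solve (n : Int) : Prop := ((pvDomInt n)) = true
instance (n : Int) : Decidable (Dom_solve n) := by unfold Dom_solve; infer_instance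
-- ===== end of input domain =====

-- B replaces A's O(n) counting loop by a closed-form O(1) arithmetic formula.

-- ===== PORT A =====
def solve (n : Int) : Int :=
  (PySem.List.pyRange 1 (n + 1) 1).foldl
    (fun count i =>
      if i < 10 then count + 1
      else if PySem.Int.mod i 2 = 1 then count + 1 else count) 0

-- ===== PORT B =====
def solve_alt (n : Int) : Int :=
  if n < 1 then 0
  else if n < 10 then n
  else 4 + PySem.Int.floordiv (n + 1) 2

-- ===== PRECONDITION & SPEC =====
def Spec_solve (n : Int) (out : Int) : Prop := out = solve_alt n
instance (n : Int) (out : Int) : Decidable (Spec_solve n out) := by unfold Spec_solve; infer_instance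

-- ===== CLAIM (what is proved, stated in full; the proofs are below) =====
def Claim_equal_solve : Prop := ∀ (n : Int), Dom_solve n → Spec_solve n (solve n)

-- ===== LEMMAS AND PROOFS =====

theorem solve_alt_closed (n : Int) (h : ¬ n < 1) (h9 : ¬ n < 10) :
    solve_alt n = 4 + (n + 1) / 2 := by
  simp only [solve_alt, if_neg h, if_neg h9,
    PySem.Int.floordiv_eq_ediv_of_pos (a := n + 1) (b := 2) (by omega)]

theorem solve_nat (m : Nat) : solve (m : Int) = solve_alt (m : Int) := by
  induction m with
  | zero => decide
  | succ k ih =>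
    have hk : (1 : Int) ≤ (k : Int) + 1 := by omega
    have hsplit : PySem.List.pyRange 1 ((k : Int) + 1 + 1) 1
        = PySem.List.pyRange 1 ((k : Int) + 1) 1 ++ [(k : Int) + 1] :=
      PySem.List.pyRange_one_succ_right hk
    have hA : solve ((k : Int) + 1)
        = (if (k : Int) + 1 < 10 then solve (k : Int) + 1
           else if PySem.Int.mod ((k : Int) + 1) 2 = 1 then solve (k : Int) + 1
           else solve (k : Int)) := by
      simp only [solve, hsplit, List.foldl_append, List.foldl_cons, List.foldl_nil]
    have hmod : PySem.Int.mod ((k : Int) + 1) 2 = ((k : Int) + 1) % 2 :=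
      PySem.Int.mod_eq_emod_of_pos (by omega)
    push_cast
    rw [hA, ih, hmod]
    by_cases h9 : (k : Int) + 1 < 10
    · simp only [if_pos h9, solve_alt]
      split_ifs <;> omega
    · rw [if_neg h9]
      have hc : solve_alt ((k : Int) + 1) = 4 + ((k : Int) + 1 + 1) / 2 :=
        solve_alt_closed _ (by omega) h9
      by_cases hk9 : (k : Int) < 10
      · -- k = 9 exactly
        have hk9' : (k : Int) = 9 := by omega
        rw [hk9'] at hc ⊢
        norm_num [solve_alt] at hc ⊢
      · have hc' : solve_alt (k : Int) = 4 + ((k : Int) + 1) / 2 :=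
          solve_alt_closed _ (by omega) hk9
        rw [hc, hc']
        split_ifs with hodd
        · omega
        · have : ((k : Int) + 1) % 2 = 0 := by omega
          omega

-- ===== VERDICT (by name: the statement is the Claim_ definition above) =====
theorem solve_spec : Claim_equal_solve := by
  intro n _
  unfold Spec_solve
  by_cases hn : n < 1
  · have h1 : PySem.List.pyRange 1 (n + 1) 1 = [] :=
      PySem.List.pyRange_one_eq_nil (by omega)
    simp [solve, solve_alt, h1, hn]
  · have hm : n = ((n.toNat : Int)) := by omega
    rw [hm]
    exact solve_nat n.toNat
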